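-- pv_equiv track=rewrite | github.com/VSNanditha/SimpleProblems | LastSubstring.py | compute
-- ===== SOURCE A (Python) =====
-- def compute(s):
--     """
--     :param s: input string
--     :return:
--     """
--     dict = {}
--     for i in range(len(s)):
--         if s[i] not in dict.keys():
--             dict[s[i]] = [i]
--         else:
--             dict[s[i]].append(i)
--     if len(dict.keys()) == 1:
--         return s
--     sorted_chars = list(dict.keys())
--     sorted_chars.sort()
--     x = sorted_chars[len(sorted_chars)-1]
--     index = dict[x].pop()
--     positions = dict[x]
--     if len(positions):
--         i = len(positions) - 1
--         while positions[i] + 1 == index: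
--             index = positions[i]
--             i -= 1
--     return s[index:]
-- ===== SOURCE B (Python) =====
-- def compute(s):
--     c = max(s)
--     i = len(s) - 1
--     while s[i] != c:
--         i -= 1
--     while i > 0 and s[i - 1] == c:
--         i -= 1
--     return s[i:]
-- ===== Notes on version B (the rewrite author's own statement) =====
-- stated objective: faster
-- what changed: B drops A's char->positions dictionary, key sorting and popped-list walk entirely: it takes c = max(s), scans backward from the end for the last occurrence of c, then extends backward over the run of c's and returns that suffix.
-- outside the precondition, e.g. on compute(''): A raises IndexError, B raises ValueError
import Mathlib
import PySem

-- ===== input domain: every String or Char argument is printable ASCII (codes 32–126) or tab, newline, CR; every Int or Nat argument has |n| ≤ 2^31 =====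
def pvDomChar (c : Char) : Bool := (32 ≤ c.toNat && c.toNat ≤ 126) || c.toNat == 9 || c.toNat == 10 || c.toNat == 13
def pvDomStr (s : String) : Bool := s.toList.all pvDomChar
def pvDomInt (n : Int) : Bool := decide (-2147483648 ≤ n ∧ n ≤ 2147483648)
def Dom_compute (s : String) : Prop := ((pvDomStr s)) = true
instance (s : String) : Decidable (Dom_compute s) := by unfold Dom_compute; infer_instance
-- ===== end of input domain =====

-- B is a simpler re-implementation: no char->positions dict, no key sort — just max(s),
-- a backward scan for its last occurrence, and a backward extension over the run of that
-- character; return value only (A also mutates its local dict, which no caller observes).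

-- ===== PORT A =====

-- dict-building loop: for i in range(len(s)): if s[i] not in dict: dict[s[i]]=[i] else append
def computeBuild (cs : List Char) : PySem.Dict Char (List Int) :=
  (PySem.List.pyRange 0 (cs.length) 1).foldl
    (fun d i =>
      let ch := PySem.List.pyGetD cs i ' '   -- s[i]; i ∈ range(len(s)) is always in range
      if d.contains ch then d.modify ch [] (fun l => l ++ [i])
      else d.insert ch [i])
    PySem.Dict.empty

-- the while loop: 'while positions[i] + 1 == index: index = positions[i]; i -= 1'.
-- fuel = positions.length + 1 bounds the iteration count (the proof shows it never runs out);
-- positions[i] with possibly negative i is pyGet? (Python wraparound); none = IndexError (unreachable here).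
def computeLoop (positions : List Int) (index : Int) (i : Int) : Nat → Int
  | 0 => index
  | fuel+1 =>
    match PySem.List.pyGet? positions i with
    | none => index
    | some p => if p + 1 = index then computeLoop positions p (i - 1) fuel else index

def compute (s : String) : String :=
  let cs := s.toList
  let d := computeBuild cs
  if (PySem.Dict.keys d).length = 1 then s
  else
    let sortedChars := PySem.List.sorted (PySem.Dict.keys d) (fun k => k) false
    match PySem.List.pyGet? sortedChars ((sortedChars.length : Int) - 1) with
    | none => ""             -- IndexError on the empty string; excluded by Pre_
    | some x =>
      match PySem.List.pop? (PySem.Dict.getD d x []) (-1) with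
      | none => ""           -- unreachable: x is a key of d, so its position list is nonempty
      | some (index, positions) =>
        let index := if positions.length ≠ 0
          then computeLoop positions index ((positions.length : Int) - 1) (positions.length + 1)
          else index
        String.ofList (PySem.List.slice cs (some index) none)

-- ===== PORT B =====

-- 'i = len(s)-1; while s[i] != c: i -= 1'  (only called with c = max(s) ∈ s, so i never reaches -1)
def findLast (cs : List Char) (c : Char) : Nat → Nat
  | 0 => 0
  | i+1 => if PySem.List.pyGetD cs ((i : Int) + 1) ' ' ≠ c then findLast cs c i else i + 1

-- 'while i > 0 and s[i-1] == c: i -= 1'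
def backLoop (cs : List Char) (c : Char) : Nat → Nat
  | 0 => 0
  | i+1 => if PySem.List.pyGetD cs (i : Int) ' ' = c then backLoop cs c i else i + 1

def compute_alt (s : String) : String :=
  let cs := s.toList
  match PySem.List.max? cs (fun x => x) with
  | none => ""               -- empty string: Python raises ValueError; excluded by Pre_
  | some c =>
    let i := findLast cs c (cs.length - 1)
    let j := backLoop cs c i
    String.ofList (PySem.List.slice cs (some (j : Int)) none)

-- ===== PRECONDITION & SPEC =====

-- Pre_ excludes exactly the empty string, on which A raises IndexError (and B ValueError).
def Pre_compute (s : String) : Prop := s.toList ≠ []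
instance (s : String) : Decidable (Pre_compute s) := by unfold Pre_compute; infer_instance
def pvWitness_compute : String := "ab"

def Spec_compute (s : String) (out : String) : Prop := out = compute_alt s
instance (s : String) (out : String) : Decidable (Spec_compute s out) := by unfold Spec_compute; infer_instance

-- ===== CLAIM (what is proved, stated in full; the proofs are below) =====
def Claim_equal_compute : Prop := ∀ (s : String), Dom_compute s → Pre_compute s → Spec_compute s (compute s)

-- ===== LEMMAS AND PROOFS =====

theorem getD_empty_of_not_contains (d : PySem.Dict Char (List Int)) (c : Char)
    (h : d.contains c = false) : d.getD c [] = [] := by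
  unfold PySem.Dict.getD PySem.Dict.get? PySem.Dict.contains at *
  rw [List.find?_eq_none.mpr]
  · rfl
  · intro p hp
    simp only [List.any_eq_false] at h
    exact h p hp

theorem pyGet?_neg_one {α : Type} (l : List α) (h : l ≠ []) :
    PySem.List.pyGet? l (-1) = some (l.getLast h) := by
  have hn : 0 < l.length := List.length_pos_iff.mpr h
  rw [List.getLast_eq_getElem]
  simp only [PySem.List.pyGet?, PySem.List.pyIdx?]
  rw [if_neg (by omega), if_pos (by omega)]
  show l[(l.length - (- -1).toNat)]? = some l[l.length - 1]
  rw [List.getElem?_eq_getElem (by omega)]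
  congr 1

theorem pyGet?_len_sub_one {α : Type} (l : List α) (h : l ≠ []) :
    PySem.List.pyGet? l ((l.length : Int) - 1) = some (l.getLast h) := by
  have hn : 0 < l.length := List.length_pos_iff.mpr h
  have : ((l.length : Int) - 1) = ((l.length - 1 : Nat) : Int) := by omega
  rw [this, PySem.List.pyGet?_natCast, List.getLast_eq_getElem,
    List.getElem?_eq_getElem (by omega)]

theorem findLast_le (cs : List Char) (c : Char) (i : Nat) : findLast cs c i ≤ i := by
  induction i with
  | zero => simp [findLast]
  | succ i ih => unfold findLast; split <;> omega

def posList (cs : List Char) (ch : Char) : List Int :=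
  (PySem.List.pyRange 0 (cs.length) 1).filter (fun i => PySem.List.pyGetD cs i ' ' == ch)

theorem build_step_eq (cs : List Char) : computeBuild cs =
    (PySem.List.pyRange 0 (cs.length) 1).foldl
      (fun d i => d.modify (PySem.List.pyGetD cs i ' ') [] (fun l => l ++ [i]))
      PySem.Dict.empty := by
  unfold computeBuild
  congr 1
  funext d i
  show (if d.contains (PySem.List.pyGetD cs i ' ') then _ else _) = _
  by_cases h : d.contains (PySem.List.pyGetD cs i ' ')
  · rw [if_pos h]
  · rw [if_neg h]
    unfold PySem.Dict.modify
    rw [getD_empty_of_not_contains d _ (by simpa using h)]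
    rfl

theorem keys_build (cs : List Char) : (computeBuild cs).keys = PySem.Set.ofList cs := by
  rw [build_step_eq]
  rw [PySem.Dict.keys_foldl_modify_key (PySem.List.pyRange 0 (cs.length) 1)
    (fun i => PySem.List.pyGetD cs i ' ') [] (fun _ i => fun l => l ++ [i]) PySem.Dict.empty]
  have hmap := PySem.List.map_pyGetD_pyRange_zero cs ' '
  simp only [PySem.List.len] at hmap
  rw [hmap]
  exact PySem.Set.update_nil_left cs

theorem getD_build (cs : List Char) (ch : Char) :
    (computeBuild cs).getD ch [] = posList cs ch := by
  rw [build_step_eq]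
  have hfm := List.foldl_map (f := fun (i : Int) => ((PySem.List.pyGetD cs i ' ', i) : Char × Int))
    (g := fun (d : PySem.Dict Char (List Int)) (p : Char × Int) => d.modify p.1 [] (fun l => l ++ [p.2]))
    (l := PySem.List.pyRange 0 (cs.length) 1) (init := PySem.Dict.empty)
  rw [← hfm, PySem.Dict.getD_foldl_modify_append]
  rw [List.filter_map, List.map_map]
  simp only [Function.comp_def]
  simp [posList]

theorem mem_posList (cs : List Char) (ch : Char) (j : Int) :
    j ∈ posList cs ch ↔ 0 ≤ j ∧ j < (cs.length : Int) ∧ PySem.List.pyGetD cs j ' ' = ch := by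
  simp [posList, List.mem_filter, PySem.List.mem_pyRange_one, and_assoc]

theorem pairwise_posList (cs : List Char) (ch : Char) : (posList cs ch).Pairwise (· < ·) := by
  exact (PySem.List.pairwise_lt_pyRange_one 0 (cs.length)).filter _

theorem posList_ne_nil (cs : List Char) (ch : Char) (h : ch ∈ cs) : posList cs ch ≠ [] := by
  obtain ⟨k, hk, hck⟩ := List.mem_iff_getElem.mp h
  have : ((k : Nat) : Int) ∈ posList cs ch := by
    rw [mem_posList]
    refine ⟨by omega, by omega, ?_⟩
    rw [PySem.List.pyGetD_natCast, List.getD_eq_getElem cs ' ' hk, hck]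
  exact List.ne_nil_of_mem this

theorem le_getLast_of_pairwise_lt {α : Type} [LinearOrder α] (l : List α)
    (hp : l.Pairwise (· < ·)) (x : α) (hx : x ∈ l) (hne : l ≠ []) : x ≤ l.getLast hne := by
  induction l with
  | nil => simp at hx
  | cons a t ih =>
    rcases List.mem_cons.mp hx with rfl | hxt
    · cases t with
      | nil => simp [List.getLast]
      | cons b u =>
        rw [List.getLast_cons (by simp)]
        exact le_of_lt ((List.pairwise_cons.mp hp).1 _ (List.getLast_mem (by simp)))
    · cases t with
      | nil => simp at hxt
      | cons b u =>
        rw [List.getLast_cons (by simp)]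
        exact ih (List.Pairwise.sublist (List.sublist_cons_self a _) hp) hxt (by simp)

theorem findLast_spec (cs : List Char) (c : Char) (i : Nat)
    (hex : ∃ k : Nat, k ≤ i ∧ PySem.List.pyGetD cs (k : Int) ' ' = c) :
    PySem.List.pyGetD cs ((findLast cs c i : Nat) : Int) ' ' = c ∧
      ∀ k : Nat, findLast cs c i < k → k ≤ i → PySem.List.pyGetD cs (k : Int) ' ' ≠ c := by
  induction i with
  | zero =>
    obtain ⟨k, hk, hck⟩ := hex
    interval_cases k
    exact ⟨by simpa [findLast] using hck, by intro k h1 h2; omega⟩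
  | succ i ih =>
    unfold findLast
    by_cases hcond : PySem.List.pyGetD cs ((i : Int) + 1) ' ' ≠ c
    · rw [if_pos hcond]
      have hex' : ∃ k : Nat, k ≤ i ∧ PySem.List.pyGetD cs (k : Int) ' ' = c := by
        obtain ⟨k, hk, hck⟩ := hex
        refine ⟨k, ?_, hck⟩
        rcases Nat.lt_succ_iff_lt_or_eq.mp (Nat.lt_succ_of_le hk) with h | rfl
        · omega
        · exact absurd (by exact_mod_cast hck) hcond
      obtain ⟨h1, h2⟩ := ih hex'
      refine ⟨h1, fun k hk1 hk2 => ?_⟩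
      rcases Nat.lt_succ_iff_lt_or_eq.mp (Nat.lt_succ_of_le hk2) with h | rfl
      · exact h2 k hk1 (by omega)
      · intro hc; exact hcond (by exact_mod_cast hc)
    · rw [if_neg hcond]
      push Not at hcond
      refine ⟨by exact_mod_cast hcond, fun k hk1 hk2 => by omega⟩

theorem backLoop_zero_of_all (cs : List Char) (c : Char)
    (hall : ∀ k : Nat, k < cs.length → PySem.List.pyGetD cs (k : Int) ' ' = c) :
    ∀ i : Nat, i ≤ cs.length → backLoop cs c i = 0 := by
  intro i
  induction i with
  | zero => intro _; rfl
  | succ i ih =>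
    intro hle
    unfold backLoop
    rw [if_pos (hall i (by omega))]
    exact ih (by omega)

theorem backLoop_eq_self (cs : List Char) (c : Char) (i : Nat)
    (h : ∀ t : Nat, i = t + 1 → PySem.List.pyGetD cs (t : Int) ' ' ≠ c) :
    backLoop cs c i = i := by
  cases i with
  | zero => rfl
  | succ t => unfold backLoop; rw [if_neg (h t rfl)]

theorem computeLoop_none (P : List Int) (ind i : Int) (fuel : Nat)
    (h : PySem.List.pyGet? P i = none) : computeLoop P ind i (fuel+1) = ind := by
  unfold computeLoop; rw [h]

theorem computeLoop_step (P : List Int) (ind i : Int) (fuel : Nat) (p : Int)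
    (h : PySem.List.pyGet? P i = some p) :
    computeLoop P ind i (fuel+1) = if p + 1 = ind then computeLoop P p (i-1) fuel else ind := by
  conv_lhs => unfold computeLoop
  rw [h]

theorem loop_eq (cs : List Char) (c : Char) :
    ∀ (m : Nat) (P : List Int) (index : Nat) (fuel : Nat),
      m + 1 ≤ fuel → m ≤ P.length →
      (∀ j : Int, j ∈ P.take m ↔ 0 ≤ j ∧ j < (index : Int) ∧ PySem.List.pyGetD cs j ' ' = c) →
      (P.take m).Pairwise (· < ·) →
      (∀ x ∈ P.drop m, (index : Int) ≤ x) →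
      computeLoop P (index : Int) ((m : Int) - 1) fuel = ((backLoop cs c index : Nat) : Int) := by
  intro m
  induction m with
  | zero =>
    intro P index fuel hfuel _ hP _ hge
    obtain ⟨fuel, rfl⟩ : ∃ f, fuel = f + 1 := ⟨fuel - 1, by omega⟩
    have hback : backLoop cs c index = index := by
      apply backLoop_eq_self
      rintro t rfl hc
      have : (t : Int) ∈ P.take 0 := (hP t).mpr ⟨by omega, by omega, hc⟩
      simp at this
    rw [show ((0:Nat):Int) - 1 = -1 by norm_num]
    cases P with
    | nil =>
      rw [computeLoop_none _ _ _ _ (by simp [PySem.List.pyGet?, PySem.List.pyIdx?]), hback]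
    | cons a t =>
      have hne' : (a::t) ≠ [] := by simp
      rw [computeLoop_step _ _ _ _ _ (pyGet?_neg_one (a::t) hne')]
      have hle : (index : Int) ≤ (a::t).getLast hne' := hge _ (List.getLast_mem hne')
      rw [if_neg (by omega), hback]
  | succ m ih =>
    intro P index fuel hfuel hm hP hpw hge
    obtain ⟨fuel, rfl⟩ : ∃ f, fuel = f + 1 := ⟨fuel - 1, by omega⟩
    have hmlt : m < P.length := by omega
    have hget : PySem.List.pyGet? P ((m+1 : Nat) - 1 : Int) = some P[m] := by
      rw [show ((m+1:Nat):Int) - 1 = ((m:Nat):Int) by push_cast; ring,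
        PySem.List.pyGet?_natCast, List.getElem?_eq_getElem hmlt]
    rw [computeLoop_step _ _ _ _ _ hget]
    have htake : P.take (m+1) = P.take m ++ [P[m]] := by
      rw [List.take_add_one, List.getElem?_eq_getElem hmlt]; rfl
    have hpmem : P[m] ∈ P.take (m+1) :=
      htake.symm ▸ List.mem_append_right (P.take m) (List.mem_singleton_self P[m])
    obtain ⟨hp0, hplt, hpc⟩ := (hP _).mp hpmem
    have hlt_p : ∀ j ∈ P.take m, j < P[m] := by
      intro j hj
      rw [htake] at hpw
      exact (List.pairwise_append.mp hpw).2.2 j hj _ (by simp)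
    obtain ⟨t, rfl⟩ : ∃ t, index = t + 1 := ⟨index - 1, by omega⟩
    by_cases hct : PySem.List.pyGetD cs (t : Int) ' ' = c
    · have hptm : (t : Int) ∈ P.take (m+1) := (hP t).mpr ⟨by omega, by omega, hct⟩
      have hpt : P[m] = (t : Int) := by
        rw [htake] at hptm
        rcases List.mem_append.mp hptm with h | h
        · have := hlt_p _ h; omega
        · exact (List.mem_singleton.mp h).symm
      rw [if_pos (by omega), hpt]
      have hback : backLoop cs c (t+1) = backLoop cs c t := by
        rw [show backLoop cs c (t+1) =
          if PySem.List.pyGetD cs (t : Int) ' ' = c then backLoop cs c t else t+1 from rfl,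
          if_pos hct]
      rw [hback]
      have harg : ((m+1:Nat):Int) - 1 - 1 = ((m:Nat):Int) - 1 := by push_cast; ring
      rw [harg]
      apply ih P t fuel (by omega) (by omega)
      · intro j
        constructor
        · intro hj
          have hj1 : j ∈ P.take (m+1) := by rw [htake]; exact List.mem_append_left _ hj
          obtain ⟨h1, h2, h3⟩ := (hP j).mp hj1
          have := hlt_p j hj
          exact ⟨h1, by omega, h3⟩
        · rintro ⟨h1, h2, h3⟩
          have hj1 : j ∈ P.take (m+1) := (hP j).mpr ⟨h1, by omega, h3⟩
          rw [htake] at hj1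
          rcases List.mem_append.mp hj1 with h | h
          · exact h
          · simp at h; omega
      · rw [htake] at hpw
        exact (List.pairwise_append.mp hpw).1
      · intro x hx
        rw [List.drop_eq_getElem_cons hmlt] at hx
        rcases List.mem_cons.mp hx with rfl | hx
        · omega
        · have := hge x hx; omega
    · have hcond : ¬(P[m] + 1 = ((t+1 : Nat) : Int)) := by
        intro heq
        have hpt : P[m] = (t : Int) := by omega
        rw [hpt] at hpc
        exact hct hpc
      have hself : backLoop cs c (t+1) = t+1 := by
        apply backLoop_eq_self
        intro t' ht'
        have h2 : t' = t := by omega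
        rw [h2]
        exact hct
      rw [if_neg hcond, hself]

theorem posList_getLast (cs : List Char) (c : Char) (hc : c ∈ cs)
    (hne : posList cs c ≠ []) :
    (posList cs c).getLast hne = ((findLast cs c (cs.length - 1) : Nat) : Int) := by
  have hn : 0 < cs.length := List.length_pos_iff.mpr (List.ne_nil_of_mem hc)
  have hgmem : (posList cs c).getLast hne ∈ posList cs c := List.getLast_mem hne
  obtain ⟨hg0, hglt, hgc⟩ := (mem_posList _ _ _).mp hgmem
  obtain ⟨k, hk, hck⟩ := List.mem_iff_getElem.mp hc
  have hex : ∃ k : Nat, k ≤ cs.length - 1 ∧ PySem.List.pyGetD cs (k : Int) ' ' = c := by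
    refine ⟨k, by omega, ?_⟩
    rw [PySem.List.pyGetD_natCast, List.getD_eq_getElem cs ' ' hk, hck]
  obtain ⟨hLc, hLmax⟩ := findLast_spec cs c (cs.length - 1) hex
  have hLle := findLast_le cs c (cs.length - 1)
  have hLmem : ((findLast cs c (cs.length - 1) : Nat) : Int) ∈ posList cs c := by
    rw [mem_posList]
    exact ⟨by omega, by omega, hLc⟩
  have h1 := le_getLast_of_pairwise_lt _ (pairwise_posList cs c) _ hLmem hne
  have h2 : ((posList cs c).getLast hne).toNat ≤ findLast cs c (cs.length - 1) := by
    by_contra hcon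
    apply hLmax ((posList cs c).getLast hne).toNat (by omega) (by omega)
    rw [Int.toNat_of_nonneg hg0]
    exact hgc
  omega

theorem compute_eq (s : String) (hpre : s.toList ≠ []) : compute s = compute_alt s := by
  obtain ⟨c, hmax⟩ : ∃ c, PySem.List.max? s.toList (fun x => x) = some c := by
    cases h : PySem.List.max? s.toList (fun x => x) with
    | none => exact absurd ((PySem.List.max?_eq_none_iff _ _).mp h) hpre
    | some c => exact ⟨c, rfl⟩
  have hcmem : c ∈ s.toList := PySem.List.max?_mem hmax
  have hcmax : ∀ y ∈ s.toList, y ≤ c := PySem.List.max?_isMax hmax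
  have hn : 0 < s.toList.length := List.length_pos_iff.mpr hpre
  simp only [compute, compute_alt]
  rw [hmax, keys_build]
  simp only []
  by_cases hone : (PySem.Set.ofList s.toList : List Char).length = 1
  · rw [if_pos hone]
    obtain ⟨k0, hk0⟩ := List.length_eq_one_iff.mp hone
    have hallk : ∀ ch ∈ s.toList, ch = k0 := by
      intro ch h
      have hm := (PySem.Set.mem_ofList s.toList ch).mpr h
      rw [hk0] at hm
      simpa using hm
    have hall : ∀ k : Nat, k < s.toList.length →
        PySem.List.pyGetD s.toList (k : Int) ' ' = c := by
      intro k hk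
      rw [PySem.List.pyGetD_natCast, List.getD_eq_getElem _ ' ' hk, hallk _ (List.getElem_mem _),
        hallk c hcmem]
    have hb0 : backLoop s.toList c (findLast s.toList c (s.toList.length - 1)) = 0 :=
      backLoop_zero_of_all _ _ hall _
        (by have := findLast_le s.toList c (s.toList.length - 1); omega)
    rw [hb0, PySem.List.slice_from_natCast]
    simp
  · rw [if_neg hone]
    have hpw := PySem.List.sorted_ofList_pairwise_lt s.toList
    have hcin : c ∈ PySem.List.sorted (PySem.Set.ofList s.toList) (fun k => k) false :=
      (PySem.List.mem_sorted _ _ _ _).mpr ((PySem.Set.mem_ofList _ _).mpr hcmem)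
    have hSCne : PySem.List.sorted (PySem.Set.ofList s.toList) (fun k => k) false ≠ [] :=
      List.ne_nil_of_mem hcin
    have hlastc : (PySem.List.sorted (PySem.Set.ofList s.toList) (fun k => k) false).getLast hSCne = c := by
      apply le_antisymm
      · exact hcmax _ ((PySem.Set.mem_ofList _ _).mp
          ((PySem.List.mem_sorted _ _ _ _).mp (List.getLast_mem hSCne)))
      · exact le_getLast_of_pairwise_lt _ hpw _ hcin hSCne
    rw [pyGet?_len_sub_one _ hSCne, hlastc]
    simp only [getD_build]
    have hPfne : posList s.toList c ≠ [] := posList_ne_nil _ _ hcmem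
    have hpop : PySem.List.pop? (posList s.toList c) (-1) =
        some ((posList s.toList c).getLast hPfne, (posList s.toList c).dropLast) := by
      conv_lhs => rw [← List.dropLast_append_getLast hPfne]
      exact PySem.List.pop?_last _ _
    rw [hpop, posList_getLast s.toList c hcmem hPfne]
    simp only []
    have hLle := findLast_le s.toList c (s.toList.length - 1)
    obtain ⟨hLc, hLmax⟩ := findLast_spec s.toList c (s.toList.length - 1) (by
      obtain ⟨k, hk, hck⟩ := List.mem_iff_getElem.mp hcmem
      refine ⟨k, by omega, ?_⟩
      rw [PySem.List.pyGetD_natCast, List.getD_eq_getElem _ ' ' hk, hck])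
    have hsplit : (posList s.toList c).dropLast ++ [((findLast s.toList c (s.toList.length - 1) : Nat) : Int)] = posList s.toList c := by
      conv_rhs => rw [← List.dropLast_append_getLast hPfne]
      rw [posList_getLast s.toList c hcmem hPfne]
    have hmemdrop : ∀ j : Int, j ∈ (posList s.toList c).dropLast ↔
        0 ≤ j ∧ j < ((findLast s.toList c (s.toList.length - 1) : Nat) : Int) ∧
          PySem.List.pyGetD s.toList j ' ' = c := by
      intro j
      constructor
      · intro hj
        have hjp : j ∈ posList s.toList c := by
          rw [← hsplit]; exact List.mem_append_left _ hj
        obtain ⟨h1, h2, h3⟩ := (mem_posList _ _ _).mp hjp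
        have hplt : j < ((findLast s.toList c (s.toList.length - 1) : Nat) : Int) := by
          have hpw2 := pairwise_posList s.toList c
          rw [← hsplit] at hpw2
          exact (List.pairwise_append.mp hpw2).2.2 j hj _ (by simp)
        exact ⟨h1, hplt, h3⟩
      · rintro ⟨h1, h2, h3⟩
        have hjp : j ∈ posList s.toList c := by
          rw [mem_posList]
          exact ⟨h1, by omega, h3⟩
        rw [← hsplit] at hjp
        rcases List.mem_append.mp hjp with h | h
        · exact h
        · simp only [List.mem_singleton] at h; omega
    by_cases hdl : ((posList s.toList c).dropLast).length = 0
    · rw [if_neg (by omega)]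
      have hPf1 : posList s.toList c = [((findLast s.toList c (s.toList.length - 1) : Nat) : Int)] := by
        rw [← hsplit, List.length_eq_zero_iff.mp hdl]
        rfl
      have hself : backLoop s.toList c (findLast s.toList c (s.toList.length - 1)) =
          findLast s.toList c (s.toList.length - 1) := by
        apply backLoop_eq_self
        intro t ht hct
        have : (t : Int) ∈ posList s.toList c := by
          rw [mem_posList]
          exact ⟨by omega, by omega, hct⟩
        rw [hPf1] at this
        simp only [List.mem_singleton] at this
        omega
      rw [hself]
    · rw [if_pos (by omega)]
      rw [loop_eq s.toList c ((posList s.toList c).dropLast).length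
        ((posList s.toList c).dropLast) (findLast s.toList c (s.toList.length - 1))
        (((posList s.toList c).dropLast).length + 1) (by omega) (by omega)
        (by rw [List.take_length]; exact hmemdrop)
        (by rw [List.take_length]; exact (pairwise_posList s.toList c).sublist (List.dropLast_sublist _))
        (by rw [List.drop_length]; intro x hx; simp at hx)]

-- ===== VERDICT (by name: the statement is the Claim_ definition above) =====
theorem compute_spec : Claim_equal_compute := by
  intro s _ hpre
  unfold Spec_compute
  exact compute_eq s hpre
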